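-- pv_equiv track=rewrite | github.com/Garrodes/Python | exos.py | existe_couples_divise
-- ===== SOURCE A (Python) =====
-- def existe_couples_divise(n, p):
--   i = n
--   exist = False
--   nb_test = 0
--   while i < p:
--     j = i + 1
--     while j <= p:
--       nb_test += 1
--       if j % i == 0:
--         return True, nb_test
--       j += 1
--     i += 1
--   return exist, nb_test
-- ===== SOURCE B (Python) =====
-- def existe_couples_divise(n, p):
--     # closed form: A scans pairs n<=i<j<=p for the first j with j % i == 0
--     if n >= p:
--         return False, 0
--     if n > 0 and 2 * n <= p:
--         # first success is (i=n, j=2n) after testing j=n+1..2n: n tests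
--         return True, n
--     if n < 0 and p >= 0:
--         # first success is (i=n, j=0) after testing j=n+1..0: -n tests
--         return True, -n
--     # no pair divides: all (p-n)(p-n+1)/2 tests performed
--     k = p - n
--     return False, k * (k + 1) // 2
-- ===== Notes on version B (the rewrite author's own statement) =====
-- stated objective: simpler
-- what changed: Replaces the nested while-loop scan over pairs with a direct closed form: the first dividing pair is (n,2n) for positive n (or (n,0) for negative n), and the failure test count is the arithmetic series (p-n)(p-n+1)/2.
import Mathlib
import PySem

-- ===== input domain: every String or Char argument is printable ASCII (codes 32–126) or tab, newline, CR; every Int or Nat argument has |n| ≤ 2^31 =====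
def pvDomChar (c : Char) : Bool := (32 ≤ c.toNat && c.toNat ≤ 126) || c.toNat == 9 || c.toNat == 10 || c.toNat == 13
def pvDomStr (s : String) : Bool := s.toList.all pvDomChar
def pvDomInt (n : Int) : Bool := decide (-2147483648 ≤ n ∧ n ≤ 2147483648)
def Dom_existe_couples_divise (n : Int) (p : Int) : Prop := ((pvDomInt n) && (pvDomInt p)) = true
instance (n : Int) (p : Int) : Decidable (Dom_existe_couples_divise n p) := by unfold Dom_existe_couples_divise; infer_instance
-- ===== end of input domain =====

-- B replaces A's nested while-loop scan with a closed form (first dividing pair / arithmetic-series count).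

-- ===== PORT A =====
-- inner while loop: j scans i+1..p, counting tests; (true, nb) = early return, (false, nb) = loop exhausted
def pvInnerA (i p j nb : Int) : Bool × Int :=
  if _h : j ≤ p then
    if PySem.Int.mod j i = 0 then (true, nb + 1)
    else pvInnerA i p (j + 1) (nb + 1)
  else (false, nb)
termination_by (p + 1 - j).toNat
decreasing_by omega

-- outer while loop over i
def pvOuterA (p i nb : Int) : Bool × Int :=
  if _h : i < p then
    match pvInnerA i p (i + 1) nb with
    | (true, nb') => (true, nb')
    | (false, nb') => pvOuterA p (i + 1) nb'
  else (false, nb)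
termination_by (p - i).toNat
decreasing_by omega

def existe_couples_divise (n : Int) (p : Int) : Bool × Int := pvOuterA p n 0

-- ===== PORT B =====
def existe_couples_divise_alt (n : Int) (p : Int) : Bool × Int :=
  if n ≥ p then (false, 0)
  else if n > 0 ∧ 2 * n ≤ p then (true, n)
  else if n < 0 ∧ p ≥ 0 then (true, -n)
  else (false, PySem.Int.floordiv ((p - n) * (p - n + 1)) 2)

-- ===== PRECONDITION & SPEC =====
-- Pre_ excludes exactly n = 0 < p, where A divides by zero (ZeroDivisionError).
def Pre_existe_couples_divise (n : Int) (p : Int) : Prop := ¬ (n = 0 ∧ 0 < p)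
instance (n : Int) (p : Int) : Decidable (Pre_existe_couples_divise n p) := by unfold Pre_existe_couples_divise; infer_instance
def pvWitness_existe_couples_divise : Int × Int := (3, 9)

def Spec_existe_couples_divise (n : Int) (p : Int) (out : Bool × Int) : Prop := out = existe_couples_divise_alt n p
instance (n : Int) (p : Int) (out : Bool × Int) : Decidable (Spec_existe_couples_divise n p out) := by unfold Spec_existe_couples_divise; infer_instance

-- ===== CLAIM (what is proved, stated in full; the proofs are below) =====
def Claim_equal_existe_couples_divise : Prop := ∀ (n : Int) (p : Int), Dom_existe_couples_divise n p → Pre_existe_couples_divise n p → Spec_existe_couples_divise n p (existe_couples_divise n p)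

-- ===== LEMMAS AND PROOFS =====

-- one outer-loop step, inner returned early / exhausted
theorem outerA_step_true (p i nb x : Int) (h : i < p)
    (hin : pvInnerA i p (i + 1) nb = (true, x)) : pvOuterA p i nb = (true, x) := by
  rw [pvOuterA, dif_pos h, hin]

theorem outerA_step_false (p i nb x : Int) (h : i < p)
    (hin : pvInnerA i p (i + 1) nb = (false, x)) : pvOuterA p i nb = pvOuterA p (i + 1) x := by
  rw [pvOuterA, dif_pos h, hin]

-- success scan for positive i: j runs up to the first multiple 2*i
theorem innerA_success_pos (i p : Int) (hi : 1 ≤ i) (hp : 2 * i ≤ p) :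
    ∀ j nb, i < j → j ≤ 2 * i → pvInnerA i p j nb = (true, nb + (2 * i - j + 1)) := by
  suffices H : ∀ k j nb, (2 * i - j).toNat = k → i < j → j ≤ 2 * i →
      pvInnerA i p j nb = (true, nb + (2 * i - j + 1)) by
    intro j nb hj hj2; exact H _ j nb rfl hj hj2
  intro k
  induction k with
  | zero =>
    intro j nb hk hj hj2
    have hj2i : j = 2 * i := by omega
    rw [pvInnerA, dif_pos (by omega : j ≤ p)]
    have hmod : PySem.Int.mod j i = 0 := by
      rw [PySem.Int.mod_eq_zero_iff_dvd]; exact ⟨2, by omega⟩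
    rw [if_pos hmod]
    congr 1; omega
  | succ k ih =>
    intro j nb hk hj hj2
    have hjlt : j < 2 * i := by omega
    rw [pvInnerA, dif_pos (by omega : j ≤ p)]
    have hmod : ¬ PySem.Int.mod j i = 0 := by
      rw [PySem.Int.mod_eq_zero_iff_dvd]
      rintro ⟨c, hc⟩
      rcases (by omega : c ≤ 1 ∨ 2 ≤ c) with h | h
      · have : i * c ≤ i * 1 := mul_le_mul_of_nonneg_left h (by omega)
        omega
      · have : i * 2 ≤ i * c := mul_le_mul_of_nonneg_left (by omega) (by omega)
        omega
    rw [if_neg hmod, ih (j + 1) (nb + 1) (by omega) (by omega) (by omega)]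
    congr 1; omega

-- success scan for negative i with 0 ≤ p: j runs up to the first multiple 0
theorem innerA_success_neg (i p : Int) (hi : i < 0) (hp : 0 ≤ p) :
    ∀ j nb, i < j → j ≤ 0 → pvInnerA i p j nb = (true, nb + (1 - j)) := by
  suffices H : ∀ k j nb, (0 - j).toNat = k → i < j → j ≤ 0 →
      pvInnerA i p j nb = (true, nb + (1 - j)) by
    intro j nb hj hj2; exact H _ j nb rfl hj hj2
  intro k
  induction k with
  | zero =>
    intro j nb hk hj hj2
    have hj0 : j = 0 := by omega
    rw [pvInnerA, dif_pos (by omega : j ≤ p)]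
    have hmod : PySem.Int.mod j i = 0 := by
      rw [PySem.Int.mod_eq_zero_iff_dvd]; exact ⟨0, by omega⟩
    rw [if_pos hmod]
    congr 1; omega
  | succ k ih =>
    intro j nb hk hj hj2
    have hjlt : j < 0 := by omega
    rw [pvInnerA, dif_pos (by omega : j ≤ p)]
    have hmod : ¬ PySem.Int.mod j i = 0 := by
      rw [PySem.Int.mod_eq_zero_iff_dvd]
      rintro ⟨c, hc⟩
      rcases (by omega : 1 ≤ c ∨ c ≤ 0) with h | h
      · have : i * c ≤ i * 1 := mul_le_mul_of_nonpos_left h (by omega)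
        omega
      · have : i * 0 ≤ i * c := mul_le_mul_of_nonpos_left (by omega) (by omega)
        omega
    rw [if_neg hmod, ih (j + 1) (nb + 1) (by omega) (by omega) (by omega)]
    congr 1; omega

-- failing scan: no multiple of i in [j, p]
theorem innerA_fail (i p : Int) :
    ∀ j nb, (∀ q, j ≤ q → q ≤ p → ¬ i ∣ q) →
      pvInnerA i p j nb = (false, nb + (if j ≤ p then p - j + 1 else 0)) := by
  suffices H : ∀ k j nb, (p + 1 - j).toNat = k → (∀ q, j ≤ q → q ≤ p → ¬ i ∣ q) →
      pvInnerA i p j nb = (false, nb + (if j ≤ p then p - j + 1 else 0)) by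
    intro j nb hnd; exact H _ j nb rfl hnd
  intro k
  induction k with
  | zero =>
    intro j nb hk hnd
    rw [pvInnerA, dif_neg (by omega : ¬ j ≤ p), if_neg (by omega : ¬ j ≤ p)]
    congr 1; omega
  | succ k ih =>
    intro j nb hk hnd
    rw [pvInnerA, dif_pos (by omega : j ≤ p)]
    have hmod : ¬ PySem.Int.mod j i = 0 := by
      rw [PySem.Int.mod_eq_zero_iff_dvd]
      exact hnd j le_rfl (by omega)
    rw [if_neg hmod, ih (j + 1) (nb + 1) (by omega) (fun q h1 h2 => hnd q (by omega) h2)]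
    split_ifs with h <;> (congr 1; omega)

-- outer loop when every iteration fails
theorem outerA_fail (p : Int) :
    ∀ i nb, i ≤ p → (∀ i' q, i ≤ i' → i' < q → q ≤ p → ¬ i' ∣ q) →
      pvOuterA p i nb = (false, nb + (p - i) * (p - i + 1) / 2) := by
  suffices H : ∀ k i nb, (p - i).toNat = k → i ≤ p → (∀ i' q, i ≤ i' → i' < q → q ≤ p → ¬ i' ∣ q) →
      pvOuterA p i nb = (false, nb + (p - i) * (p - i + 1) / 2) by
    intro i nb h1 h2; exact H _ i nb rfl h1 h2
  intro k
  induction k with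
  | zero =>
    intro i nb hk hip hnd
    rw [pvOuterA, dif_neg (by omega : ¬ i < p)]
    have h0 : p - i = 0 := by omega
    rw [h0]; norm_num
  | succ k ih =>
    intro i nb hk hip hnd
    have hin : pvInnerA i p (i + 1) nb = (false, nb + (p - (i + 1) + 1)) := by
      rw [innerA_fail i p (i + 1) nb (fun q h1 h2 => hnd i q le_rfl (by omega) h2)]
      rw [if_pos (by omega : i + 1 ≤ p)]
    rw [outerA_step_false p i nb _ (by omega : i < p) hin]
    rw [ih (i + 1) (nb + (p - (i + 1) + 1)) (by omega) (by omega)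
        (fun i' q h1 h2 h3 => hnd i' q (by omega) h2 h3)]
    have key : (p - i) * (p - i + 1) / 2 = (p - (i + 1)) * (p - (i + 1) + 1) / 2 + (p - i) := by
      have h2 : (p - i) * (p - i + 1) = (p - (i + 1)) * (p - (i + 1) + 1) + (p - i) * 2 := by ring
      rw [h2, Int.add_mul_ediv_right _ _ (by norm_num : (2:Int) ≠ 0)]
    congr 1; omega

-- ===== VERDICT (by name: the statement is the Claim_ definition above) =====
theorem existe_couples_divise_spec : Claim_equal_existe_couples_divise := by
  intro n p _hD hPre
  unfold Spec_existe_couples_divise existe_couples_divise existe_couples_divise_alt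
  by_cases h1 : n ≥ p
  · rw [pvOuterA, dif_neg (by omega : ¬ n < p), if_pos h1]
  · replace h1 : n < p := by omega
    by_cases h2 : n > 0 ∧ 2 * n ≤ p
    · rw [outerA_step_true p n 0 _ (by omega : n < p)
        (innerA_success_pos n p (by omega) h2.2 (n + 1) 0 (by omega) (by omega))]
      rw [if_neg (by omega : ¬ n ≥ p), if_pos h2]
      congr 1; omega
    · by_cases h3 : n < 0 ∧ p ≥ 0
      · rw [outerA_step_true p n 0 _ (by omega : n < p)
          (innerA_success_neg n p h3.1 h3.2 (n + 1) 0 (by omega) (by omega))]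
        rw [if_neg (by omega : ¬ n ≥ p), if_neg h2, if_pos h3]
        congr 1; omega
      · unfold Pre_existe_couples_divise at hPre
        have hH : ∀ i' q, n ≤ i' → i' < q → q ≤ p → ¬ i' ∣ q := by
          rintro i' q hni hiq hqp ⟨c, hc⟩
          rcases lt_trichotomy n 0 with hn | hn | hn
          · -- n < 0, so p < 0 (else h3); every i' < q ≤ p < 0, no multiple of i' in (i', p]
            have hp0 : p < 0 := by omega
            rcases (by omega : 1 ≤ c ∨ c ≤ 0) with h | h
            · have : i' * c ≤ i' * 1 := mul_le_mul_of_nonpos_left h (by omega)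
              omega
            · have : i' * 0 ≤ i' * c := mul_le_mul_of_nonpos_left (by omega) (by omega)
              omega
          · exact absurd ⟨hn, by omega⟩ hPre
          · -- n > 0, so p < 2 * n ≤ 2 * i'
            have h2n : p < 2 * n := by omega
            rcases (by omega : c ≤ 1 ∨ 2 ≤ c) with h | h
            · have : i' * c ≤ i' * 1 := mul_le_mul_of_nonneg_left h (by omega)
              omega
            · have : i' * 2 ≤ i' * c := mul_le_mul_of_nonneg_left (by omega) (by omega)
              omega
        rw [outerA_fail p n 0 (by omega) hH]
        rw [if_neg (by omega : ¬ n ≥ p), if_neg h2, if_neg h3]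
        rw [PySem.Int.floordiv_eq_ediv_of_pos (by norm_num : (0:Int) < 2)]
        congr 1; omega
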